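-- pv_equiv track=rewrite | github.com/cyberdynamo/CP-Practice | Practice/007.py | funct
-- ===== SOURCE A (Python) =====
-- def funct(name,number):
--     l=len(name)
--     while(l!=0):
--         if(str(l) in number):
--             return name[l-1]
--         else:
--             l-=1
--     return "X"
-- ===== SOURCE B (Python) =====
-- def funct(name, number):
--     candidates = [l for l in range(1, len(name) + 1) if str(l) in number]
--     return name[max(candidates) - 1] if candidates else "X"
-- ===== Notes on version B (the rewrite author's own statement) =====
-- stated objective: simpler
-- what changed: Replaces the descending early-exit while-loop with a build-all-candidates comprehension over the ascending range followed by max-then-index selection.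
import Mathlib
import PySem

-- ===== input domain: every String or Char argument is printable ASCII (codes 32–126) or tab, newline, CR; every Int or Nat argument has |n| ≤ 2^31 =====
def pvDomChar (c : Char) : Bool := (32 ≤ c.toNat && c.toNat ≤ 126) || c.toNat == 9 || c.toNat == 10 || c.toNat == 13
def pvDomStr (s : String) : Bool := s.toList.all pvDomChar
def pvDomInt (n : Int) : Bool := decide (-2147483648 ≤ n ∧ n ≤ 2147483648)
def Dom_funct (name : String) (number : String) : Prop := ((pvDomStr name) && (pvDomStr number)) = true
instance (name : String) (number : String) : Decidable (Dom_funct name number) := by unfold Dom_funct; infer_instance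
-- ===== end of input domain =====

-- B is simpler: build all candidate lengths, then pick the max; return value only, no side effects.

-- ===== PORT A =====
-- the while-loop of A: l counts down from len(name) to 0
def functGoA (name : String) (number : String) : Nat → String
  | 0 => "X"
  | l' + 1 =>
      if PySem.Str.isIn (PySem.Int.toStr ((l' : Int) + 1)) number then
        ((PySem.Str.pyGet? name (((l' : Int) + 1) - 1)).map String.singleton).getD ""
      else functGoA name number l'

def funct (name : String) (number : String) : String :=
  functGoA name number name.toList.length

-- ===== PORT B =====
def funct_alt (name : String) (number : String) : String :=
  match PySem.List.max?
      ((PySem.List.pyRange 1 ((name.toList.length : Int) + 1) 1).filter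
        (fun l => PySem.Str.isIn (PySem.Int.toStr l) number)) (fun x => x) with
  | some m => ((PySem.Str.pyGet? name (m - 1)).map String.singleton).getD ""
  | none => "X"

-- ===== PRECONDITION & SPEC =====
def Spec_funct (name : String) (number : String) (out : String) : Prop := out = funct_alt name number
instance (name : String) (number : String) (out : String) : Decidable (Spec_funct name number out) := by unfold Spec_funct; infer_instance

-- ===== CLAIM =====
def Claim_equal_funct : Prop := ∀ (name : String) (number : String), Dom_funct name number → Spec_funct name number (funct name number)

-- ===== LEMMAS AND PROOFS =====

-- in a strictly increasing list, every element is ≤ the last one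
lemma le_getLast_of_pairwise_lt (xs : List Int) (h : xs.Pairwise (· < ·)) :
    ∀ x ∈ xs, ∀ m, xs.getLast? = some m → x ≤ m := by
  induction xs with
  | nil => simp
  | cons a t ih =>
    rcases List.pairwise_cons.mp h with ⟨ha, ht⟩
    intro x hx m hm
    cases t with
    | nil => simp at hx hm; omega
    | cons b u =>
      rw [List.getLast?_cons_cons] at hm
      rcases List.mem_cons.mp hx with rfl | hx'
      · have h1 := ha b (by simp)
        have h2 := ih ht b (by simp) m hm
        omega
      · exact ih ht x hx' m hm

-- max? (id) of a strictly increasing list is its last element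
lemma max?_eq_getLast_of_pairwise_lt (xs : List Int) (h : xs.Pairwise (· < ·)) :
    PySem.List.max? xs (fun x => x) = xs.getLast? := by
  cases hmx : PySem.List.max? xs (fun x => x) with
  | none =>
    have : xs = [] := (PySem.List.max?_eq_none_iff xs (fun x => x)).mp hmx
    simp [this]
  | some m =>
    have hmem : m ∈ xs := PySem.List.max?_mem hmx
    have hne : xs ≠ [] := by rintro rfl; simp at hmem
    obtain ⟨g, hg⟩ : ∃ g, xs.getLast? = some g := by
      cases hgl : xs.getLast? with
      | none => exact absurd (List.getLast?_eq_none_iff.mp hgl) hne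
      | some g => exact ⟨g, rfl⟩
    have hgmem : g ∈ xs := List.mem_of_getLast? hg
    have h1 : m ≤ g := le_getLast_of_pairwise_lt xs h m hmem g hg
    have h2 : g ≤ m := PySem.List.max?_isMax hmx g hgmem
    rw [hg]; congr 1; omega

-- A's countdown loop returns the LAST element of the ascending candidate list (index form)
lemma functGoA_eq_getLast (name number : String) (l : Nat) :
    functGoA name number l =
      match ((PySem.List.pyRange 1 ((l : Int) + 1) 1).filter
          (fun x => PySem.Str.isIn (PySem.Int.toStr x) number)).getLast? with
      | some m => ((PySem.Str.pyGet? name (m - 1)).map String.singleton).getD ""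
      | none => "X" := by
  induction l with
  | zero =>
    rw [PySem.List.pyRange_one_eq_nil (by norm_num)]
    simp [functGoA]
  | succ l' ih =>
    have hsplit : PySem.List.pyRange 1 ((l' : Int) + 1 + 1) 1 =
        PySem.List.pyRange 1 ((l' : Int) + 1) 1 ++ [(l' : Int) + 1] := by
      exact PySem.List.pyRange_one_succ_right (by omega)
    show functGoA name number (l' + 1) = _
    rw [show ((l' + 1 : Nat) : Int) = (l' : Int) + 1 by push_cast; ring, hsplit,
        List.filter_append]
    by_cases hp : PySem.Str.isIn (PySem.Int.toStr ((l' : Int) + 1)) number = true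
    · simp only [functGoA, hp, if_true, List.filter_cons, List.filter_nil,
        List.getLast?_concat]
    · have hp' : PySem.Str.isIn (PySem.Int.toStr ((l' : Int) + 1)) number = false := by
        simpa using hp
      simp only [functGoA, hp', Bool.false_eq_true, if_false, List.filter_cons,
        List.filter_nil, List.append_nil]
      exact ih

-- ===== VERDICT =====
theorem funct_spec : Claim_equal_funct := by
  intro name number _
  unfold Spec_funct funct funct_alt
  rw [functGoA_eq_getLast]
  rw [max?_eq_getLast_of_pairwise_lt _
    (List.Pairwise.filter _ (PySem.List.pairwise_lt_pyRange_one 1 _))]
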